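-- pv_equiv track=rewrite | github.com/zhuoliding/PKUpython2023_byzxg | H10/1201third.py | min_packs
-- ===== SOURCE A (Python) =====
-- def min_packs(w, n, snacks):
--     snacks.sort(reverse=True)  # 按重量降序排序
--     count = 0  # 记录使用的包装袋数量
--
--     while snacks:
--         current_weight = snacks.pop(0)  # 取出当前最重的零食
--         count += 1  # 使用一个包装袋
--
--         if snacks and current_weight + snacks[-1] <= w:
--             snacks.pop()  # 如果当前零食和剩余零食重量小于等于w，放入同一包装袋
--
--     return count
-- ===== SOURCE B (Python) =====
-- def min_packs(w, n, snacks):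
--     s = sorted(snacks)
--     i, j = 0, len(s) - 1
--     count = 0
--     while i <= j:
--         if i < j and s[i] + s[j] <= w:
--             i += 1
--         j -= 1
--         count += 1
--     return count
-- ===== Notes on version B (the rewrite author's own statement) =====
-- stated objective: faster
-- what changed: Replaced the destructive deque over a descending sort (pop(0) is O(n) each step) with two index pointers sweeping a single ascending sort, so no element is ever moved.
import Mathlib
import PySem

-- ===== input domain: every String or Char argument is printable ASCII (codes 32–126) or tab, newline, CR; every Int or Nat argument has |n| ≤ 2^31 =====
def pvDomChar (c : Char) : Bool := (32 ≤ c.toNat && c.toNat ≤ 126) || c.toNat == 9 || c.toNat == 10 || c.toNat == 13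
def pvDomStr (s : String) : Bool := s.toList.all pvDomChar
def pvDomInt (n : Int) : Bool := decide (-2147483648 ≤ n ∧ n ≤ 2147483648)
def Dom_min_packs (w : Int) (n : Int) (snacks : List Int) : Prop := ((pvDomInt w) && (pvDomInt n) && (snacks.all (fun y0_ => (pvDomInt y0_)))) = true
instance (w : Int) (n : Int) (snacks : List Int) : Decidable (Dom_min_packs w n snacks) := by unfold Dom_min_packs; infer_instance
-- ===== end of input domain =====

-- B replaces A's destructive pop(0)/pop() deque over a descending sort by a two-pointer
-- sweep over one ascending sort (faster: no O(n) pop(0) shifts). A sorts `snacks` in place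
-- and empties it; B leaves `snacks` untouched — the equivalence proved is about the RETURN value.

-- ===== PORT A =====
-- while snacks: pop(0); maybe pop() — structural recursion on the (descending) list
def pvALoop (w : Int) : List Int → Int
  | [] => 0
  | x :: rest =>
    if rest ≠ [] ∧ x + PySem.List.pyGetD rest (-1) 0 ≤ w then
      1 + pvALoop w rest.dropLast
    else
      1 + pvALoop w rest
  termination_by l => l.length
  decreasing_by
  all_goals simp [List.length_dropLast]

def min_packs (w : Int) (n : Int) (snacks : List Int) : Int :=
  pvALoop w (PySem.List.sorted snacks (fun x => x) true)

-- ===== PORT B =====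
-- while i <= j: if i < j and s[i]+s[j] <= w: i += 1; j -= 1; count += 1
def pvBLoop (w : Int) (s : List Int) (i j : Int) : Int :=
  if i ≤ j then
    (if i < j ∧ PySem.List.pyGetD s i 0 + PySem.List.pyGetD s j 0 ≤ w then
      pvBLoop w s (i + 1) (j - 1)
    else
      pvBLoop w s i (j - 1)) + 1
  else 0
  termination_by (j + 1 - i).toNat
  decreasing_by all_goals omega

def min_packs_alt (w : Int) (n : Int) (snacks : List Int) : Int :=
  let s := PySem.List.sorted snacks (fun x => x) false
  pvBLoop w s 0 (PySem.List.len s - 1)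

-- ===== PRECONDITION & SPEC =====
def Spec_min_packs (w : Int) (n : Int) (snacks : List Int) (out : Int) : Prop := out = min_packs_alt w n snacks
instance (w : Int) (n : Int) (snacks : List Int) (out : Int) : Decidable (Spec_min_packs w n snacks out) := by unfold Spec_min_packs; infer_instance

-- ===== CLAIM (what is proved, stated in full; the proofs are below) =====
def Claim_equal_min_packs : Prop := ∀ (w : Int) (n : Int) (snacks : List Int), Dom_min_packs w n snacks → Spec_min_packs w n snacks (min_packs w n snacks)

-- ===== LEMMAS AND PROOFS =====

-- Python's sorted(xs, reverse=True) on Ints is the reverse of sorted(xs)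
theorem pv_sorted_rev_eq_reverse (xs : List Int) :
    PySem.List.sorted xs (fun x => x) true = (PySem.List.sorted xs (fun x => x) false).reverse := by
  have hperm : (PySem.List.sorted xs (fun x => x) true).Perm
      ((PySem.List.sorted xs (fun x => x) false).reverse) :=
    (PySem.List.sorted_perm xs (fun x => x) true).trans
      ((PySem.List.sorted_perm xs (fun x => x) false).symm.trans (List.reverse_perm _).symm)
  have h1 : (PySem.List.sorted xs (fun x => x) true).Pairwise (fun a b : Int => b ≤ a) :=
    PySem.List.sorted_pairwise_rev xs (fun x => x)
  have h2 : ((PySem.List.sorted xs (fun x => x) false).reverse).Pairwise (fun a b : Int => b ≤ a) := by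
    rw [List.pairwise_reverse]
    exact PySem.List.sorted_pairwise xs (fun x => x)
  exact hperm.eq_of_pairwise (fun a b _ _ hab hba => le_antisymm hba hab) h1 h2

-- s[a..a+m] starts with s[a]
theorem pv_seg_cons (s : List Int) (a m : Nat) (ha : a < s.length) :
    (s.drop a).take (m + 1) = s[a] :: (s.drop (a + 1)).take m := by
  rw [List.drop_eq_getElem_cons ha, List.take_succ_cons]

-- s[a..a+m] ends with s[a+m]
theorem pv_seg_concat (s : List Int) (a m : Nat) (hm : a + m < s.length) :
    (s.drop a).take (m + 1) = (s.drop a).take m ++ [s[a + m]] := by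
  rw [List.take_add_one, List.getElem?_drop, List.getElem?_eq_getElem hm]
  rfl

-- the two-pointer loop on s computes A's deque loop on the reversed segment s[i..j]
theorem pvBLoop_eq_pvALoop (w : Int) (s : List Int) : ∀ (k : Nat) (i j : Int),
    (j + 1 - i).toNat ≤ k → 0 ≤ i → j < (s.length : Int) →
    pvBLoop w s i j = pvALoop w (((s.drop i.toNat).take (j + 1 - i).toNat).reverse) := by
  intro k
  induction k with
  | zero =>
    intro i j hk hi hj
    have hij : ¬ i ≤ j := by omega
    have h0 : (j + 1 - i).toNat = 0 := by omega
    rw [pvBLoop, if_neg hij, h0]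
    simp only [List.take_zero, List.reverse_nil]
    rw [pvALoop]
  | succ k ih =>
    intro i j hk hi hj
    by_cases hij : i ≤ j
    · have hb : j.toNat < s.length := by omega
      have hgi : PySem.List.pyGetD s i 0 = s[i.toNat] :=
        PySem.List.pyGetD_eq_getElem s 0 hi (by omega)
      have hgj : PySem.List.pyGetD s j 0 = s[j.toNat] :=
        PySem.List.pyGetD_eq_getElem s 0 (by omega) hj
      by_cases hlt : i < j
      · -- at least two elements left: m + 2 of them
        obtain ⟨m, hm'⟩ : ∃ m, j.toNat - i.toNat = m + 1 := ⟨j.toNat - i.toNat - 1, by omega⟩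
        have hm : (j + 1 - i).toNat = (m + 1) + 1 := by omega
        have hrev : ((s.drop i.toNat).take ((m + 1) + 1)).reverse
            = s[j.toNat] :: (((s.drop (i.toNat + 1)).take m).reverse ++ [s[i.toNat]]) := by
          rw [pv_seg_concat s i.toNat (m + 1) (by omega), pv_seg_cons s i.toNat m (by omega)]
          simp [show i.toNat + (m + 1) = j.toNat from by omega]
        by_cases hw : s[i.toNat] + s[j.toNat] ≤ w
        · -- pack two: both sides advance past s[i] and s[j]
          rw [pvBLoop, if_pos hij, if_pos ⟨hlt, by rw [hgi, hgj]; omega⟩,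
            ih (i + 1) (j - 1) (by omega) (by omega) (by omega)]
          have hm2 : (j - 1 + 1 - (i + 1)).toNat = m := by omega
          have hi1 : (i + 1).toNat = i.toNat + 1 := by omega
          rw [hm2, hi1, hm, hrev, pvALoop]
          rw [if_pos ⟨by simp, by rw [PySem.List.pyGetD_neg_one_append_singleton]; omega⟩,
            List.dropLast_concat]
          omega
        · -- pack only s[j]: both sides keep s[i..j-1]
          rw [pvBLoop, if_pos hij, if_neg (by rw [hgi, hgj]; omega),
            ih i (j - 1) (by omega) hi (by omega)]
          have hm2 : (j - 1 + 1 - i).toNat = m + 1 := by omega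
          rw [hm2, hm, hrev, pvALoop]
          rw [if_neg ?_]
          · rw [pv_seg_cons s i.toNat m (by omega), List.reverse_cons]
            omega
          · intro hcc
            rw [PySem.List.pyGetD_neg_one_append_singleton] at hcc
            omega
      · -- i = j : one element left; both loops count it and stop
        have hieq : i.toNat = j.toNat := by omega
        have hm : (j + 1 - i).toNat = 0 + 1 := by omega
        have hm0 : (j - 1 + 1 - i).toNat = 0 := by omega
        rw [pvBLoop, if_pos hij, if_neg (by omega), ih i (j - 1) (by omega) hi (by omega),
          hm0, hm, pv_seg_cons s i.toNat 0 (by omega)]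
        simp only [List.take_zero, List.reverse_nil, List.reverse_cons, List.nil_append]
        rw [pvALoop, pvALoop, if_neg (by simp)]
        rw [pvALoop]
        omega
    · have h0 : (j + 1 - i).toNat = 0 := by omega
      rw [pvBLoop, if_neg hij, h0]
      simp only [List.take_zero, List.reverse_nil]
      rw [pvALoop]

-- ===== VERDICT (by name: the statement is the Claim_ definition above) =====
theorem min_packs_spec : Claim_equal_min_packs := by
  intro w _n snacks _
  unfold Spec_min_packs min_packs min_packs_alt
  set s := PySem.List.sorted snacks (fun x => x) false with hs
  have h1 : (PySem.List.len s - 1 + 1 - 0).toNat = s.length := by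
    simp [PySem.List.len_eq]
  rw [pv_sorted_rev_eq_reverse, ← hs,
    pvBLoop_eq_pvALoop w s (PySem.List.len s - 1 + 1 - 0).toNat 0 (PySem.List.len s - 1) le_rfl
      le_rfl (by simp [PySem.List.len_eq]), h1]
  simp
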